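-- pv_equiv track=rewrite | github.com/sbernesto/edx-search | search/tests/mock_search_engine.py | _process_query_string
-- ===== SOURCE A (Python) =====
-- def _process_query_string(documents_to_search, search_strings):
--     """ keep the documents that contain at least one of the search strings provided """
--     def has_string(dictionary_object, search_string):
--         """ search for string in dictionary items, look down into nested dictionaries """
--         for name in dictionary_object:
--             if isinstance(dictionary_object[name], dict):
--                 return has_string(dictionary_object[name], search_string)
--             elif search_string in dictionary_object[name]:
--                 return True
--         return False
--
--     documents_to_keep = []
--     for search_string in search_strings:
--         documents_to_keep.extend([d for d in documents_to_search if has_string(d["content"], search_string)])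
--
--     return documents_to_keep
-- ===== SOURCE B (Python) =====
-- def _process_query_string(documents_to_search, search_strings):
--     """ keep the documents that contain at least one of the search strings provided """
--     documents_to_keep = []
--     for search_string in search_strings:
--         for document in documents_to_search:
--             if any(search_string in value for value in document["content"].values()):
--                 documents_to_keep.append(document)
--     return documents_to_keep
-- ===== Notes on version B (the rewrite author's own statement) =====
-- stated objective: simpler
-- what changed: B drops A's recursive has_string helper and the per-string list-comprehension-plus-extend, using a flat double loop that appends a document when any() of its content dict's values contains the search string.
import Mathlib
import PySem

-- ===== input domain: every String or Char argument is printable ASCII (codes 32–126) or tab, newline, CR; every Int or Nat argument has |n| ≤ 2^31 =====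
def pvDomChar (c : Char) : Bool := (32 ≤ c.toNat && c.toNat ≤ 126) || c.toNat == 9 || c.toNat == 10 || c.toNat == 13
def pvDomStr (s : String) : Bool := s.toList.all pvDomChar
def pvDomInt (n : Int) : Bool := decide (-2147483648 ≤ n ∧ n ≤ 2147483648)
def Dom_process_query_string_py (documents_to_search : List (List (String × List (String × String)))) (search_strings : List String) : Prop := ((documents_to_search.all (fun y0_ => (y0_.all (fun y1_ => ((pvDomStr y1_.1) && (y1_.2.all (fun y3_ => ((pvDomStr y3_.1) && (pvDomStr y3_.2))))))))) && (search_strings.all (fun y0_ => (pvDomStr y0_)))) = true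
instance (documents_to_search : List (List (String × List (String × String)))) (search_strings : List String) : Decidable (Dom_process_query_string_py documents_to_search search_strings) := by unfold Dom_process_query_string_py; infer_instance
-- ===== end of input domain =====

-- B replaces A's recursive has_string helper and per-string comprehension+extend by a flat
-- double loop with any() over the content dict's values: simpler, same complexity.


-- ===== PORT A =====
-- has_string: scan the dict's items in order; at this value type (str values only) the
-- isinstance-dict branch of the Python is unreachable, so only the 'in' test remains.
def pvHasString (s : String) : List (String × String) → Bool
  | [] => false
  | (_, v) :: rest => if PySem.Str.isIn s v then true else pvHasString s rest

def process_query_string_py (documents_to_search : List (List (String × List (String × String)))) (search_strings : List String) : List (List (String × List (String × String))) :=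
  search_strings.foldl (fun documents_to_keep search_string =>
    documents_to_keep ++ documents_to_search.filter (fun d =>
      pvHasString search_string
        (PySem.Dict.ofList ((PySem.Dict.ofList d).getD "content" [])).items)) []

-- ===== PORT B =====
def process_query_string_py_alt (documents_to_search : List (List (String × List (String × String)))) (search_strings : List String) : List (List (String × List (String × String))) :=
  search_strings.foldl (fun documents_to_keep search_string =>
    documents_to_search.foldl (fun documents_to_keep document =>
      if (PySem.Dict.ofList ((PySem.Dict.ofList document).getD "content" [])).values.any
           (fun value => PySem.Str.isIn search_string value)
      then documents_to_keep ++ [document] else documents_to_keep) documents_to_keep) []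

-- ===== PRECONDITION & SPEC =====
-- Pre_ excludes exactly the inputs where Python A raises KeyError: a document without a
-- "content" key is looked up whenever at least one search string is processed.
def Pre_process_query_string_py (documents_to_search : List (List (String × List (String × String)))) (search_strings : List String) : Prop :=
  search_strings = [] ∨ ∀ d ∈ documents_to_search, (PySem.Dict.ofList d).contains "content" = true
instance (documents_to_search : List (List (String × List (String × String)))) (search_strings : List String) : Decidable (Pre_process_query_string_py documents_to_search search_strings) := by unfold Pre_process_query_string_py; infer_instance

def pvWitness_process_query_string_py : (List (List (String × List (String × String)))) × List String :=
  ([[("content", [("body", "hello world")])], [("content", [("body", "bye")])]], ["ell"])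

def Spec_process_query_string_py (documents_to_search : List (List (String × List (String × String)))) (search_strings : List String) (out : List (List (String × List (String × String)))) : Prop := out = process_query_string_py_alt documents_to_search search_strings
instance (documents_to_search : List (List (String × List (String × String)))) (search_strings : List String) (out : List (List (String × List (String × String)))) : Decidable (Spec_process_query_string_py documents_to_search search_strings out) := by unfold Spec_process_query_string_py; infer_instance

-- ===== CLAIM (what is proved, stated in full; the proofs are below) =====
def Claim_equal_process_query_string_py : Prop := ∀ (documents_to_search : List (List (String × List (String × String)))) (search_strings : List String), Dom_process_query_string_py documents_to_search search_strings → Pre_process_query_string_py documents_to_search search_strings → Spec_process_query_string_py documents_to_search search_strings (process_query_string_py documents_to_search search_strings)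

-- ===== LEMMAS AND PROOFS =====
-- A's early-return item scan is 'any of the values contains s'.
theorem pvHasString_eq_any (s : String) (l : List (String × String)) :
    pvHasString s l = l.any (fun p => PySem.Str.isIn s p.2) := by
  induction l with
  | nil => rfl
  | cons p rest ih => cases p with | mk k v => simp [pvHasString, ih]

-- ===== VERDICT (by name: the statement is the Claim_ definition above) =====
theorem process_query_string_py_spec : Claim_equal_process_query_string_py := by
  intro docs strs _ _
  unfold Spec_process_query_string_py process_query_string_py process_query_string_py_alt
  apply PySem.List.foldl_congr_mem
  intro acc s _
  rw [PySem.List.foldl_append_if_eq_filter]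
  congr 1
  apply List.filter_congr
  intro d _
  rw [pvHasString_eq_any]
  simp [PySem.Dict.values, List.any_map, Function.comp_def]
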